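-- pv_equiv track=rewrite | github.com/OG-APPS/collaboro | interfaces/screen_monitor.py | get_suggested_actions
-- ===== SOURCE A (Python) =====
-- from typing import List, Dict, Any, Optional
--
-- def get_suggested_actions(page_type: str, texts: List[str]) -> List[str]:
--     """Get suggested actions for the current page type."""
--     suggestions = []
--
--     if page_type == "NOTIFICATION_PERMISSION":
--         suggestions.extend([
--             "Click 'Allow' for notifications",
--             "Click 'Don't allow' to skip notifications"
--         ])
--
--     elif page_type == "LOCATION_PERMISSION":
--         suggestions.extend([
--             "Click 'Don't allow' for location (recommended)",
--             "Click 'Allow' if location is needed"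
--         ])
--
--     elif page_type == "CONTACT_SYNC_PERMISSION":
--         suggestions.extend([
--             "Click 'Don't allow' to skip contact sync (recommended)",
--             "Click 'OK' to allow contact access"
--         ])
--
--     elif page_type == "AGE_VERIFICATION":
--         suggestions.extend([
--             "Enter a valid birthdate",
--             "Click continue after entering date"
--         ])
--
--     elif page_type == "ADS_PREFERENCES":
--         suggestions.extend([
--             "Click 'Generic ads' to select less personalized ads",
--             "Click 'Personalized ads' if you prefer targeted ads",
--             "Look for 'Select' button under your choice"
--         ])
--
--     elif page_type == "TERMS_OF_SERVICE" or page_type == "PRIVACY_POLICY":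
--         suggestions.extend([
--             "Click 'Accept' or 'Agree'",
--             "Scroll down to find accept button"
--         ])
--
--     elif page_type == "GENERIC_DIALOG":
--         suggestions.extend([
--             "Click 'OK', 'Got it', or 'Continue'",
--             "Look for dismiss/close button"
--         ])
--
--     elif page_type == "APP_UPDATE":
--         suggestions.extend([
--             "Click 'Later' or 'Skip' to avoid update",
--             "Click 'Update' if update is required"
--         ])
--
--     elif page_type == "LOGIN":
--         suggestions.extend([
--             "Enter login credentials",
--             "Look for 'Skip' or guest options"
--         ])
--
--     elif page_type == "UNKNOWN":
--         # Try to find common action buttons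
--         text_lower = [t.lower() for t in texts]
--         if any('allow' in t for t in text_lower):
--             suggestions.append("Consider clicking 'Allow' button")
--         if any('deny' in t or "don't allow" in t for t in text_lower):
--             suggestions.append("Consider clicking 'Deny' or 'Don't allow'")
--         if any('ok' in t or 'got it' in t for t in text_lower):
--             suggestions.append("Consider clicking 'OK' or 'Got it'")
--         if any('continue' in t for t in text_lower):
--             suggestions.append("Consider clicking 'Continue'")
--         if any('skip' in t or 'later' in t for t in text_lower):
--             suggestions.append("Consider clicking 'Skip' or 'Later'")
--         if any('close' in t or 'dismiss' in t for t in text_lower):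
--             suggestions.append("Consider clicking 'Close' or dismiss button")
--
--     return suggestions
-- ===== SOURCE B (Python) =====
-- from typing import List
--
-- _SUGGESTIONS = {
--     "NOTIFICATION_PERMISSION": [
--         "Click 'Allow' for notifications",
--         "Click 'Don't allow' to skip notifications",
--     ],
--     "LOCATION_PERMISSION": [
--         "Click 'Don't allow' for location (recommended)",
--         "Click 'Allow' if location is needed",
--     ],
--     "CONTACT_SYNC_PERMISSION": [
--         "Click 'Don't allow' to skip contact sync (recommended)",
--         "Click 'OK' to allow contact access",
--     ],
--     "AGE_VERIFICATION": [
--         "Enter a valid birthdate",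
--         "Click continue after entering date",
--     ],
--     "ADS_PREFERENCES": [
--         "Click 'Generic ads' to select less personalized ads",
--         "Click 'Personalized ads' if you prefer targeted ads",
--         "Look for 'Select' button under your choice",
--     ],
--     "TERMS_OF_SERVICE": [
--         "Click 'Accept' or 'Agree'",
--         "Scroll down to find accept button",
--     ],
--     "PRIVACY_POLICY": [
--         "Click 'Accept' or 'Agree'",
--         "Scroll down to find accept button",
--     ],
--     "GENERIC_DIALOG": [
--         "Click 'OK', 'Got it', or 'Continue'",
--         "Look for dismiss/close button",
--     ],
--     "APP_UPDATE": [
--         "Click 'Later' or 'Skip' to avoid update",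
--         "Click 'Update' if update is required",
--     ],
--     "LOGIN": [
--         "Enter login credentials",
--         "Look for 'Skip' or guest options",
--     ],
-- }
--
--
-- def get_suggested_actions(page_type: str, texts: List[str]) -> List[str]:
--     """Get suggested actions for the current page type."""
--     if page_type == "UNKNOWN":
--         # one pass over texts, lowercasing each once and OR-ing six flags
--         allow = deny = ok = cont = skip = close = False
--         for t in texts:
--             tl = t.lower()
--             allow = allow or 'allow' in tl
--             deny = deny or 'deny' in tl or "don't allow" in tl
--             ok = ok or 'ok' in tl or 'got it' in tl
--             cont = cont or 'continue' in tl
--             skip = skip or 'skip' in tl or 'later' in tl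
--             close = close or 'close' in tl or 'dismiss' in tl
--         out = []
--         if allow:
--             out.append("Consider clicking 'Allow' button")
--         if deny:
--             out.append("Consider clicking 'Deny' or 'Don't allow'")
--         if ok:
--             out.append("Consider clicking 'OK' or 'Got it'")
--         if cont:
--             out.append("Consider clicking 'Continue'")
--         if skip:
--             out.append("Consider clicking 'Skip' or 'Later'")
--         if close:
--             out.append("Consider clicking 'Close' or dismiss button")
--         return out
--     return list(_SUGGESTIONS.get(page_type, []))
-- ===== Notes on version B (the rewrite author's own statement) =====
-- stated objective: simpler
-- what changed: The nine-branch if/elif chain becomes a static dict lookup returning a fresh copy, and the UNKNOWN case's six any() scans over a pre-lowered list become one pass over texts that lowercases each text once and sets six boolean flags.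
import Mathlib
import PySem

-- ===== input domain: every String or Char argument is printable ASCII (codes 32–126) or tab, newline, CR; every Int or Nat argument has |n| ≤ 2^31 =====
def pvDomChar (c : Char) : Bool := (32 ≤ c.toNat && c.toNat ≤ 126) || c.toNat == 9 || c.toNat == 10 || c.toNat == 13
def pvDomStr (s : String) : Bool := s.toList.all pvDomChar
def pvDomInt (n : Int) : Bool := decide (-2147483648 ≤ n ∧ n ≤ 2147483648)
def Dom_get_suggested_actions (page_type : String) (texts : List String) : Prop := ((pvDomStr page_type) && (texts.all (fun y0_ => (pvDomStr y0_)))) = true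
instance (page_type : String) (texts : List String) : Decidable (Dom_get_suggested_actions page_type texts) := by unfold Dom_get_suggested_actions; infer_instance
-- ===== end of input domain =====

-- B replaces the nine-branch if/elif chain by a static dict lookup (fresh copy) and the
-- UNKNOWN case's six any() scans by one pass over texts setting six boolean flags; objective: simpler.


-- ===== PORT A =====
def get_suggested_actions (page_type : String) (texts : List String) : List String :=
  let suggestions : List String := []
  if page_type == "NOTIFICATION_PERMISSION" then
    suggestions ++ ["Click 'Allow' for notifications",
                    "Click 'Don't allow' to skip notifications"]
  else if page_type == "LOCATION_PERMISSION" then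
    suggestions ++ ["Click 'Don't allow' for location (recommended)",
                    "Click 'Allow' if location is needed"]
  else if page_type == "CONTACT_SYNC_PERMISSION" then
    suggestions ++ ["Click 'Don't allow' to skip contact sync (recommended)",
                    "Click 'OK' to allow contact access"]
  else if page_type == "AGE_VERIFICATION" then
    suggestions ++ ["Enter a valid birthdate",
                    "Click continue after entering date"]
  else if page_type == "ADS_PREFERENCES" then
    suggestions ++ ["Click 'Generic ads' to select less personalized ads",
                    "Click 'Personalized ads' if you prefer targeted ads",
                    "Look for 'Select' button under your choice"]
  else if page_type == "TERMS_OF_SERVICE" || page_type == "PRIVACY_POLICY" then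
    suggestions ++ ["Click 'Accept' or 'Agree'",
                    "Scroll down to find accept button"]
  else if page_type == "GENERIC_DIALOG" then
    suggestions ++ ["Click 'OK', 'Got it', or 'Continue'",
                    "Look for dismiss/close button"]
  else if page_type == "APP_UPDATE" then
    suggestions ++ ["Click 'Later' or 'Skip' to avoid update",
                    "Click 'Update' if update is required"]
  else if page_type == "LOGIN" then
    suggestions ++ ["Enter login credentials",
                    "Look for 'Skip' or guest options"]
  else if page_type == "UNKNOWN" then
    let text_lower := texts.map PySem.Str.lower
    let s1 := if text_lower.any (fun t => PySem.Str.isIn "allow" t) then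
                suggestions ++ ["Consider clicking 'Allow' button"] else suggestions
    let s2 := if text_lower.any (fun t => PySem.Str.isIn "deny" t || PySem.Str.isIn "don't allow" t) then
                s1 ++ ["Consider clicking 'Deny' or 'Don't allow'"] else s1
    let s3 := if text_lower.any (fun t => PySem.Str.isIn "ok" t || PySem.Str.isIn "got it" t) then
                s2 ++ ["Consider clicking 'OK' or 'Got it'"] else s2
    let s4 := if text_lower.any (fun t => PySem.Str.isIn "continue" t) then
                s3 ++ ["Consider clicking 'Continue'"] else s3
    let s5 := if text_lower.any (fun t => PySem.Str.isIn "skip" t || PySem.Str.isIn "later" t) then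
                s4 ++ ["Consider clicking 'Skip' or 'Later'"] else s4
    let s6 := if text_lower.any (fun t => PySem.Str.isIn "close" t || PySem.Str.isIn "dismiss" t) then
                s5 ++ ["Consider clicking 'Close' or dismiss button"] else s5
    s6
  else
    suggestions

-- ===== PORT B =====
-- the module-level dict _SUGGESTIONS
def pvSuggestionsTable : PySem.Dict String (List String) :=
  PySem.Dict.mk [
    ("NOTIFICATION_PERMISSION", ["Click 'Allow' for notifications",
                                 "Click 'Don't allow' to skip notifications"]),
    ("LOCATION_PERMISSION", ["Click 'Don't allow' for location (recommended)",
                             "Click 'Allow' if location is needed"]),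
    ("CONTACT_SYNC_PERMISSION", ["Click 'Don't allow' to skip contact sync (recommended)",
                                 "Click 'OK' to allow contact access"]),
    ("AGE_VERIFICATION", ["Enter a valid birthdate",
                          "Click continue after entering date"]),
    ("ADS_PREFERENCES", ["Click 'Generic ads' to select less personalized ads",
                         "Click 'Personalized ads' if you prefer targeted ads",
                         "Look for 'Select' button under your choice"]),
    ("TERMS_OF_SERVICE", ["Click 'Accept' or 'Agree'",
                          "Scroll down to find accept button"]),
    ("PRIVACY_POLICY", ["Click 'Accept' or 'Agree'",
                        "Scroll down to find accept button"]),
    ("GENERIC_DIALOG", ["Click 'OK', 'Got it', or 'Continue'",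
                        "Look for dismiss/close button"]),
    ("APP_UPDATE", ["Click 'Later' or 'Skip' to avoid update",
                    "Click 'Update' if update is required"]),
    ("LOGIN", ["Enter login credentials",
               "Look for 'Skip' or guest options"])]

-- the single-pass flag loop of B's UNKNOWN branch
def pvScanStep (s : Bool × Bool × Bool × Bool × Bool × Bool) (t : String) :
    Bool × Bool × Bool × Bool × Bool × Bool :=
  let tl := PySem.Str.lower t
  (s.1 || PySem.Str.isIn "allow" tl,
   s.2.1 || PySem.Str.isIn "deny" tl || PySem.Str.isIn "don't allow" tl,
   s.2.2.1 || PySem.Str.isIn "ok" tl || PySem.Str.isIn "got it" tl,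
   s.2.2.2.1 || PySem.Str.isIn "continue" tl,
   s.2.2.2.2.1 || PySem.Str.isIn "skip" tl || PySem.Str.isIn "later" tl,
   s.2.2.2.2.2 || PySem.Str.isIn "close" tl || PySem.Str.isIn "dismiss" tl)

def get_suggested_actions_alt (page_type : String) (texts : List String) : List String :=
  if page_type == "UNKNOWN" then
    let f := texts.foldl pvScanStep (false, false, false, false, false, false)
    (if f.1 then ["Consider clicking 'Allow' button"] else []) ++
    (if f.2.1 then ["Consider clicking 'Deny' or 'Don't allow'"] else []) ++
    (if f.2.2.1 then ["Consider clicking 'OK' or 'Got it'"] else []) ++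
    (if f.2.2.2.1 then ["Consider clicking 'Continue'"] else []) ++
    (if f.2.2.2.2.1 then ["Consider clicking 'Skip' or 'Later'"] else []) ++
    (if f.2.2.2.2.2 then ["Consider clicking 'Close' or dismiss button"] else [])
  else
    pvSuggestionsTable.getD page_type []

-- ===== PRECONDITION & SPEC =====
def Spec_get_suggested_actions (page_type : String) (texts : List String) (out : List String) : Prop := out = get_suggested_actions_alt page_type texts
instance (page_type : String) (texts : List String) (out : List String) : Decidable (Spec_get_suggested_actions page_type texts out) := by unfold Spec_get_suggested_actions; infer_instance

-- ===== CLAIM (what is proved, stated in full; the proofs are below) =====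
def Claim_equal_get_suggested_actions : Prop := ∀ (page_type : String) (texts : List String), Dom_get_suggested_actions page_type texts → Spec_get_suggested_actions page_type texts (get_suggested_actions page_type texts)

-- ===== LEMMAS AND PROOFS =====
-- B's folded flags are exactly A's six `any` tests over the lowered texts
theorem pvScan_eq (texts : List String) (s : Bool × Bool × Bool × Bool × Bool × Bool) :
    texts.foldl pvScanStep s =
      (s.1 || texts.any (fun t => PySem.Str.isIn "allow" (PySem.Str.lower t)),
       s.2.1 || texts.any (fun t => PySem.Str.isIn "deny" (PySem.Str.lower t) || PySem.Str.isIn "don't allow" (PySem.Str.lower t)),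
       s.2.2.1 || texts.any (fun t => PySem.Str.isIn "ok" (PySem.Str.lower t) || PySem.Str.isIn "got it" (PySem.Str.lower t)),
       s.2.2.2.1 || texts.any (fun t => PySem.Str.isIn "continue" (PySem.Str.lower t)),
       s.2.2.2.2.1 || texts.any (fun t => PySem.Str.isIn "skip" (PySem.Str.lower t) || PySem.Str.isIn "later" (PySem.Str.lower t)),
       s.2.2.2.2.2 || texts.any (fun t => PySem.Str.isIn "close" (PySem.Str.lower t) || PySem.Str.isIn "dismiss" (PySem.Str.lower t))) := by
  induction texts generalizing s with
  | nil => simp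
  | cons h t ih => simp [pvScanStep, ih, Bool.or_assoc]

-- ===== VERDICT (by name: the statement is the Claim_ definition above) =====
theorem get_suggested_actions_spec : Claim_equal_get_suggested_actions := by
  intro page_type texts _
  unfold Spec_get_suggested_actions
  by_cases hU : page_type = "UNKNOWN"
  · subst hU
    unfold get_suggested_actions get_suggested_actions_alt
    simp only [pvScan_eq, Bool.false_or, List.any_map, Function.comp_def, beq_iff_eq,
      String.reduceEq, if_true, if_false]
    generalize texts.any (fun t => PySem.Str.isIn "allow" (PySem.Str.lower t)) = a1
    generalize texts.any (fun t => PySem.Str.isIn "deny" (PySem.Str.lower t) || PySem.Str.isIn "don't allow" (PySem.Str.lower t)) = a2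
    generalize texts.any (fun t => PySem.Str.isIn "ok" (PySem.Str.lower t) || PySem.Str.isIn "got it" (PySem.Str.lower t)) = a3
    generalize texts.any (fun t => PySem.Str.isIn "continue" (PySem.Str.lower t)) = a4
    generalize texts.any (fun t => PySem.Str.isIn "skip" (PySem.Str.lower t) || PySem.Str.isIn "later" (PySem.Str.lower t)) = a5
    generalize texts.any (fun t => PySem.Str.isIn "close" (PySem.Str.lower t) || PySem.Str.isIn "dismiss" (PySem.Str.lower t)) = a6
    cases a1 <;> cases a2 <;> cases a3 <;> cases a4 <;> cases a5 <;> cases a6 <;> rfl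
  · by_cases h1 : page_type = "NOTIFICATION_PERMISSION"
    · subst h1; rfl
    by_cases h2 : page_type = "LOCATION_PERMISSION"
    · subst h2; rfl
    by_cases h3 : page_type = "CONTACT_SYNC_PERMISSION"
    · subst h3; rfl
    by_cases h4 : page_type = "AGE_VERIFICATION"
    · subst h4; rfl
    by_cases h5 : page_type = "ADS_PREFERENCES"
    · subst h5; rfl
    by_cases h6 : page_type = "TERMS_OF_SERVICE"
    · subst h6; rfl
    by_cases h7 : page_type = "PRIVACY_POLICY"
    · subst h7; rfl
    by_cases h8 : page_type = "GENERIC_DIALOG"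
    · subst h8; rfl
    by_cases h9 : page_type = "APP_UPDATE"
    · subst h9; rfl
    by_cases h10 : page_type = "LOGIN"
    · subst h10; rfl
    unfold get_suggested_actions get_suggested_actions_alt
    simp only [pvSuggestionsTable, PySem.Dict.getD_eq_get?_getD, beq_iff_eq, PySem.Dict.get?]
    simp [hU, h1, h2, h3, h4, h5, h6, h7, h8, h9, h10,
      Ne.symm h1, Ne.symm h2, Ne.symm h3, Ne.symm h4, Ne.symm h5, Ne.symm h6,
      Ne.symm h7, Ne.symm h8, Ne.symm h9, Ne.symm h10]
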